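-- pv_equiv track=rewrite | github.com/Kurorororo/didp-models | talent-scheduling/read_talent_scheduling.py | compute_base_costs
-- ===== SOURCE A (Python) =====
-- def compute_base_costs(actor_to_scenes, actor_to_cost, scene_to_duration):
--     n_scenes = len(scene_to_duration)
--     n_actors = len(actor_to_scenes)
--     scene_to_base_cost = [
--         scene_to_duration[i]
--         * sum(actor_to_cost[j] for j in range(n_actors) if actor_to_scenes[j][i] == 1)
--         for i in range(n_scenes)
--     ]
--     return scene_to_base_cost
-- ===== SOURCE B (Python) =====
-- def compute_base_costs(actor_to_scenes, actor_to_cost, scene_to_duration):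
--     n = len(scene_to_duration)
--     pairs = [(i, actor_to_cost[j])
--              for j, row in enumerate(actor_to_scenes)
--              for i in range(n) if row[i] == 1]
--     pairs.sort(key=lambda p: p[0])
--     result = []
--     k = 0
--     for i in range(n):
--         total = 0
--         while k < len(pairs) and pairs[k][0] == i:
--             total += pairs[k][1]
--             k += 1
--         result.append(scene_to_duration[i] * total)
--     return result
-- ===== Notes on version B (the rewrite author's own statement) =====
-- stated objective: alternative
-- what changed: Replaced the scene-major nested gather (per-scene sum over all actors) by a sparse pipeline: flatten all 1-entries into (scene, cost) pairs, stable-sort by scene index, then one streaming pass groups consecutive equal scenes and multiplies by durations.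
import Mathlib
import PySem

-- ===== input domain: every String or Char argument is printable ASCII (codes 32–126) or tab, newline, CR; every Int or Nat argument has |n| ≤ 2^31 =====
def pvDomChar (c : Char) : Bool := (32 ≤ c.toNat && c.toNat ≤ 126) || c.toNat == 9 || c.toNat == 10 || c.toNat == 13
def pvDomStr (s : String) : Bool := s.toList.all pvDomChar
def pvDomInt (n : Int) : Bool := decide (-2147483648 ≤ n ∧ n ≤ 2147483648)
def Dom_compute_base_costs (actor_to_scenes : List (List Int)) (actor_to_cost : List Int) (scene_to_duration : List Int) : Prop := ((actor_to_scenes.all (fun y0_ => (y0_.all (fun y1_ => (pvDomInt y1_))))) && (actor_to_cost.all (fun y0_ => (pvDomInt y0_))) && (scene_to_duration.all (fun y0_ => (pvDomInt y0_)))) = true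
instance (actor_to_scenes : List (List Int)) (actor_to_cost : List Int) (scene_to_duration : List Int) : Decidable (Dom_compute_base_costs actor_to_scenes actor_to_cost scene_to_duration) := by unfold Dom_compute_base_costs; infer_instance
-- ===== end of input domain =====

-- B replaces A's scene-major nested gather by a sparse pipeline: flatten the 1-entries into
-- (scene, cost) pairs, stable-sort by scene, then one streaming group-sum pass (objective: alternative).

-- ===== PORT A =====
def compute_base_costs (actor_to_scenes : List (List Int)) (actor_to_cost : List Int) (scene_to_duration : List Int) : List Int :=
  let n_scenes := scene_to_duration.length
  let n_actors := actor_to_scenes.length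
  (List.range n_scenes).map (fun (i : Nat) =>
    PySem.List.pyGetD scene_to_duration (i : Int) 0 *
      (List.range n_actors).foldl (fun (acc : Int) (j : Nat) =>
        if PySem.List.pyGetD (PySem.List.pyGetD actor_to_scenes (j : Int) []) (i : Int) 0 == 1
        then acc + PySem.List.pyGetD actor_to_cost (j : Int) 0 else acc) 0)

-- ===== PORT B =====
-- the 'while k < len(pairs) and pairs[k][0] == i' loop: consume the leading group with scene index i
def pvTakeGroup (i : Int) : List (Int × Int) → Int × List (Int × Int)
  | [] => (0, [])
  | p :: rest =>
      if p.1 == i then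
        let r := pvTakeGroup i rest
        (p.2 + r.1, r.2)
      else (0, p :: rest)

-- the 'for i in range(n)' result loop; fuel counts the remaining scenes
def pvScan (d : List Int) : List (Int × Int) → Nat → Nat → List Int
  | _, _, 0 => []
  | ps, i, fuel + 1 =>
      let g := pvTakeGroup (i : Int) ps
      (PySem.List.pyGetD d (i : Int) 0 * g.1) :: pvScan d g.2 (i + 1) fuel

def compute_base_costs_alt (actor_to_scenes : List (List Int)) (actor_to_cost : List Int) (scene_to_duration : List Int) : List Int :=
  let n := scene_to_duration.length
  let pairs : List (Int × Int) :=
    (List.range actor_to_scenes.length).flatMap (fun (j : Nat) =>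
      (List.range n).filterMap (fun (i : Nat) =>
        if PySem.List.pyGetD (PySem.List.pyGetD actor_to_scenes (j : Int) []) (i : Int) 0 == 1
        then some ((i : Int), PySem.List.pyGetD actor_to_cost (j : Int) 0) else none))
  let sortedPairs := PySem.List.sorted pairs (fun p => p.1) false
  pvScan scene_to_duration sortedPairs 0 n

-- ===== PRECONDITION & SPEC =====
-- Pre_ excludes exactly the inputs on which Python A raises IndexError: a row shorter than the
-- number of scenes, or a 1-entry in a row whose actor index is past the end of actor_to_cost
-- (Python B raises on exactly the same inputs, so nothing A returns on is excluded).
def Pre_compute_base_costs (actor_to_scenes : List (List Int)) (actor_to_cost : List Int) (scene_to_duration : List Int) : Prop :=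
  ∀ j ∈ List.range actor_to_scenes.length,
    scene_to_duration.length ≤ (actor_to_scenes.getD j []).length ∧
    (j < actor_to_cost.length ∨
      ∀ i ∈ List.range scene_to_duration.length, (actor_to_scenes.getD j []).getD i 0 ≠ 1)
instance (actor_to_scenes : List (List Int)) (actor_to_cost : List Int) (scene_to_duration : List Int) : Decidable (Pre_compute_base_costs actor_to_scenes actor_to_cost scene_to_duration) := by unfold Pre_compute_base_costs; infer_instance

def pvWitness_compute_base_costs : List (List Int) × List Int × List Int :=
  ([[1, 0], [0, 1], [1, 1]], [3, 4, 5], [2, 7])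

def Spec_compute_base_costs (actor_to_scenes : List (List Int)) (actor_to_cost : List Int) (scene_to_duration : List Int) (out : List Int) : Prop := out = compute_base_costs_alt actor_to_scenes actor_to_cost scene_to_duration
instance (actor_to_scenes : List (List Int)) (actor_to_cost : List Int) (scene_to_duration : List Int) (out : List Int) : Decidable (Spec_compute_base_costs actor_to_scenes actor_to_cost scene_to_duration out) := by unfold Spec_compute_base_costs; infer_instance

-- ===== CLAIM (what is proved, stated in full; the proofs are below) =====
def Claim_equal_compute_base_costs : Prop := ∀ (actor_to_scenes : List (List Int)) (actor_to_cost : List Int) (scene_to_duration : List Int), Dom_compute_base_costs actor_to_scenes actor_to_cost scene_to_duration → Pre_compute_base_costs actor_to_scenes actor_to_cost scene_to_duration → Spec_compute_base_costs actor_to_scenes actor_to_cost scene_to_duration (compute_base_costs actor_to_scenes actor_to_cost scene_to_duration)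

-- ===== LEMMAS AND PROOFS =====

-- pvTakeGroup on a fst-sorted list whose fsts are all ≥ v: group sum and remainder are filters
theorem pv_takeGroup_eq (v : Int) :
    ∀ (ps : List (Int × Int)), ps.Pairwise (fun p q => p.1 ≤ q.1) → (∀ p ∈ ps, v ≤ p.1) →
      pvTakeGroup v ps =
        (((ps.filter (fun p => p.1 == v)).map Prod.snd).sum, ps.filter (fun p => ¬ p.1 == v)) := by
  intro ps
  induction ps with
  | nil => intro _ _; simp [pvTakeGroup]
  | cons p rest ih =>
      intro hpw hge
      have hrestpw := hpw.of_cons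
      have hhead := List.pairwise_cons.mp hpw |>.1
      have hrestge : ∀ q ∈ rest, v ≤ q.1 := fun q hq => hge q (List.mem_cons_of_mem _ hq)
      by_cases hp : p.1 = v
      · simp only [pvTakeGroup, hp, beq_self_eq_true, if_true, ih hrestpw hrestge]
        simp [hp]
      · have hplt : v < p.1 := lt_of_le_of_ne (hge p (List.mem_cons_self)) (fun h => hp h.symm)
        have hnone : ∀ q ∈ p :: rest, ¬ (q.1 == v) = true := by
          intro q hq
          rcases List.mem_cons.mp hq with rfl | hq'
          · simp [hp]
          · have := lt_of_lt_of_le hplt (hhead q hq')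
            simp; omega
        have h1 : (p :: rest).filter (fun p => p.1 == v) = [] :=
          List.filter_eq_nil_iff.mpr hnone
        simp [pvTakeGroup, hp, h1]
        exact (List.filter_eq_self.mpr (fun q hq => by
          simpa using hnone q (List.mem_cons_of_mem _ hq))).symm

-- the streaming scan equals the per-scene filtered group sums
theorem pv_scan_eq (d : List Int) :
    ∀ (fuel i : Nat) (ps : List (Int × Int)),
      ps.Pairwise (fun p q => p.1 ≤ q.1) → (∀ p ∈ ps, (i : Int) ≤ p.1) →
      pvScan d ps i fuel =
        (List.range' i fuel).map (fun (k : Nat) =>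
          PySem.List.pyGetD d (k : Int) 0 *
            ((ps.filter (fun p => p.1 == (k : Int))).map Prod.snd).sum) := by
  intro fuel
  induction fuel with
  | zero => intro i ps _ _; simp [pvScan]
  | succ fuel ih =>
      intro i ps hpw hge
      rw [List.range'_succ, List.map_cons]
      rw [pvScan, pv_takeGroup_eq _ ps hpw hge]
      have hrem : ps.filter (fun p => ¬ p.1 == (i : Int)) =
          ps.filter (fun p => !decide (p.1 = (i : Int))) := by
        apply List.filter_congr; intro x _; simp
      have hrempw : (ps.filter (fun p => ¬ p.1 == (i : Int))).Pairwise (fun p q => p.1 ≤ q.1) :=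
        hpw.filter _
      have hremge : ∀ p ∈ ps.filter (fun p => ¬ p.1 == (i : Int)), ((i + 1 : Nat) : Int) ≤ p.1 := by
        intro p hp
        rw [hrem] at hp
        have hmem := List.mem_filter.mp hp
        have h1 := hge p hmem.1
        have h2 : ¬ p.1 = (i : Int) := by simpa using hmem.2
        push_cast; omega
      rw [ih (i + 1) _ hrempw hremge]
      congr 1
      apply List.map_congr_left
      intro k hk
      have hki : i + 1 ≤ k := (List.mem_range'_1.mp hk).1
      congr 1
      have hf : ps.filter (fun a => a.1 == (k : Int) && !decide (a.1 = (i : Int)))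
          = ps.filter (fun p => p.1 == (k : Int)) := by
        apply List.filter_congr
        intro x _
        by_cases hx : x.1 = (k : Int)
        · simp [hx]; omega
        · simp [hx]
      rw [hrem, List.filter_filter, hf]

-- the group with scene index i inside one actor's pair list is that actor's single contribution
theorem pv_inner (g : Nat → Bool) (cost : Int) (i : Nat) :
    ∀ (l : List Nat), l.Nodup →
      (((l.filterMap (fun i' => if g i' then some (((i' : Nat) : Int), cost) else none)).filter
          (fun p => p.1 == (i : Int))).map Prod.snd).sum
        = if i ∈ l ∧ g i then cost else 0 := by
  intro l
  induction l with
  | nil => intro _; simp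
  | cons k l ih =>
      intro hnd
      obtain ⟨hknl, hnd'⟩ := List.nodup_cons.mp hnd
      have ihv := ih hnd'
      by_cases hgk : g k
      · by_cases hki : k = i
        · have h1 : i ∉ l := hki ▸ hknl
          have h2 : g i = true := hki ▸ hgk
          have h3 : ((k : Int) == (i : Int)) = true := by simp [hki]
          simp [hgk, h3, ihv, h1, h2]
          exact fun h' => absurd hki.symm h'
        · have h3 : ((k : Int) == (i : Int)) = false := by simp; omega
          have hik : ¬ i = k := fun h => hki h.symm
          simp [hgk, h3, ihv, List.mem_cons, hik]
      · have hgk' : g k = false := by simpa using hgk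
        by_cases hki : i = k
        · have h2 : g i = false := hki ▸ hgk'
          simp [hgk', ihv, h2]
        · simp [hgk', ihv, List.mem_cons, hki]

-- sum of a flatMap is the sum of the per-block sums
theorem pv_sum_flatMap (g : Nat → List Int) (l : List Nat) :
    (l.flatMap g).sum = (l.map (fun x => (g x).sum)).sum := by
  induction l with
  | nil => simp
  | cons x l ih => simp [ih]

-- a sum of guarded terms is the sum over the filtered list
theorem pv_sum_map_ite (p : Nat → Bool) (f : Nat → Int) (l : List Nat) :
    (l.map (fun j => if p j then f j else 0)).sum = ((l.filter p).map f).sum := by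
  induction l with
  | nil => simp
  | cons x l ih => by_cases h : p x <;> simp [h, ih]

-- B in gather normal form
theorem pv_alt_eq (a : List (List Int)) (c : List Int) (d : List Int) :
    compute_base_costs_alt a c d
      = (List.range d.length).map (fun (i : Nat) =>
          PySem.List.pyGetD d (i : Int) 0 *
            ((List.range a.length).map (fun (j : Nat) =>
              if PySem.List.pyGetD (PySem.List.pyGetD a (j : Int) []) (i : Int) 0 == 1
              then PySem.List.pyGetD c (j : Int) 0 else 0)).sum) := by
  unfold compute_base_costs_alt
  simp only []
  have hpw := PySem.List.sorted_pairwise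
    (xs := (List.range a.length).flatMap (fun (j : Nat) =>
      (List.range d.length).filterMap (fun (i : Nat) =>
        if PySem.List.pyGetD (PySem.List.pyGetD a (j : Int) []) (i : Int) 0 == 1
        then some ((i : Int), PySem.List.pyGetD c (j : Int) 0) else none)))
    (key := fun p : Int × Int => p.1)
  have hge : ∀ p ∈ PySem.List.sorted
      ((List.range a.length).flatMap (fun (j : Nat) =>
        (List.range d.length).filterMap (fun (i : Nat) =>
          if PySem.List.pyGetD (PySem.List.pyGetD a (j : Int) []) (i : Int) 0 == 1
          then some ((i : Int), PySem.List.pyGetD c (j : Int) 0) else none)))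
      (fun p : Int × Int => p.1) false, ((0 : Nat) : Int) ≤ p.1 := by
    intro p hp
    have hp' := (PySem.List.mem_sorted _ _ _ _).mp hp
    simp only [List.mem_flatMap, List.mem_filterMap] at hp'
    obtain ⟨j, -, i, -, hi⟩ := hp'
    split at hi
    · cases hi; simp
    · cases hi
  rw [pv_scan_eq d d.length 0 _ hpw hge, ← List.range_eq_range']
  apply List.map_congr_left
  intro i hi
  have hin : i < d.length := List.mem_range.mp hi
  congr 1
  have hperm := (PySem.List.sorted_perm
    (xs := (List.range a.length).flatMap (fun (j : Nat) =>
      (List.range d.length).filterMap (fun (i : Nat) =>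
        if PySem.List.pyGetD (PySem.List.pyGetD a (j : Int) []) (i : Int) 0 == 1
        then some ((i : Int), PySem.List.pyGetD c (j : Int) 0) else none)))
    (key := fun p : Int × Int => p.1) (rev := false)).filter
      (fun p : Int × Int => p.1 == (i : Int))
  rw [List.Perm.sum_eq (hperm.map Prod.snd)]
  rw [List.filter_flatMap, List.map_flatMap, pv_sum_flatMap]
  apply congrArg List.sum
  apply List.map_congr_left
  intro j _
  rw [pv_inner
    (g := fun i' => PySem.List.pyGetD (PySem.List.pyGetD a (j : Int) []) (i' : Int) 0 == 1)
    (cost := PySem.List.pyGetD c (j : Int) 0) i (List.range d.length) List.nodup_range]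
  simp [List.mem_range, hin]

-- A in the same gather normal form
theorem pv_A_eq (a : List (List Int)) (c : List Int) (d : List Int) :
    compute_base_costs a c d
      = (List.range d.length).map (fun (i : Nat) =>
          PySem.List.pyGetD d (i : Int) 0 *
            ((List.range a.length).map (fun (j : Nat) =>
              if PySem.List.pyGetD (PySem.List.pyGetD a (j : Int) []) (i : Int) 0 == 1
              then PySem.List.pyGetD c (j : Int) 0 else 0)).sum) := by
  unfold compute_base_costs
  simp only []
  apply List.map_congr_left
  intro i _
  congr 1
  rw [PySem.List.foldl_if_eq_foldl_filter, PySem.List.foldl_add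
    (g := fun (j : Nat) => PySem.List.pyGetD c (j : Int) 0), pv_sum_map_ite]
  simp

-- ===== VERDICT (by name: the statement is the Claim_ definition above) =====
theorem compute_base_costs_spec : Claim_equal_compute_base_costs := by
  intro a c d _ _
  unfold Spec_compute_base_costs
  rw [pv_A_eq, pv_alt_eq]
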